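-- pv_equiv track=rewrite | github.com/dawar-s/algo-ds-sol-python | algoexpert/medium/MinimumPassesOfMatrix.py | minimumPassesOfMatrix
-- ===== SOURCE A (Python) =====
-- from collections import deque
--
-- def minimumPassesOfMatrix(matrix: list):
--     queue = deque()
--     r = len(matrix)
--     c = len(matrix[0])
--     for row in range(r):
--         for col in range(c):
--             if matrix[row][col] > 0:
--                 queue.append([row, col])
--
--     if len(queue) == r * c:
--         return 0
--
--     passes = 0
--     while True:
--         lst = []
--         while queue:
--             row, col = queue.popleft()
--             add_to_list(row, col, lst, matrix)
--
--         if len(lst) > 0: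
--             passes += 1
--             for item in lst:
--                 queue.append(item)
--         else:
--             break
--
--     for row in range(r):
--         for col in range(c):
--             if matrix[row][col] < 0:
--                 return -1
--
--     return passes
--
-- def add_to_list(row, col, lst, matrix):
--     if row-1 >= 0 and matrix[row-1][col] < 0:
--         matrix[row-1][col] *= -1
--         lst.append([row-1, col])
--     if row+1 < len(matrix) and matrix[row+1][col] < 0:
--         matrix[row+1][col] *= -1
--         lst.append([row+1, col])
--     if col+1 < len(matrix[0]) and matrix[row][col+1] < 0:
--         matrix[row][col+1] *= -1
--         lst.append([row, col+1])
--     if col-1 >= 0 and matrix[row][col-1] < 0: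
--         matrix[row][col-1] *= -1
--         lst.append([row, col-1])
-- ===== SOURCE B (Python) =====
-- def minimumPassesOfMatrix(matrix: list):
--     r = len(matrix)
--     c = len(matrix[0])
--
--     def pos(i, j):
--         return 0 <= i < r and 0 <= j < c and matrix[i][j] > 0
--
--     passes = 0
--     while True:
--         new = [[-matrix[i][j]
--                 if matrix[i][j] < 0 and (pos(i - 1, j) or pos(i + 1, j)
--                                          or pos(i, j + 1) or pos(i, j - 1))
--                 else matrix[i][j]
--                 for j in range(c)]
--                for i in range(r)]
--         if all(new[i][j] == matrix[i][j] for i in range(r) for j in range(c)):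
--             break
--         for i in range(r):
--             matrix[i][:c] = new[i]
--         passes += 1
--
--     if any(matrix[i][j] < 0 for i in range(r) for j in range(c)):
--         return -1
--     return passes
-- ===== Notes on version B (the rewrite author's own statement) =====
-- stated objective: simpler
-- what changed: Replaces the BFS frontier queue and its mutating neighbour helper with repeated whole-grid sweeps: each pass builds the next grid from a snapshot (flip every negative cell orthogonally adjacent to a currently positive cell) and stops when a sweep changes nothing; the r*c shortcut and the queue disappear.
import Mathlib
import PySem

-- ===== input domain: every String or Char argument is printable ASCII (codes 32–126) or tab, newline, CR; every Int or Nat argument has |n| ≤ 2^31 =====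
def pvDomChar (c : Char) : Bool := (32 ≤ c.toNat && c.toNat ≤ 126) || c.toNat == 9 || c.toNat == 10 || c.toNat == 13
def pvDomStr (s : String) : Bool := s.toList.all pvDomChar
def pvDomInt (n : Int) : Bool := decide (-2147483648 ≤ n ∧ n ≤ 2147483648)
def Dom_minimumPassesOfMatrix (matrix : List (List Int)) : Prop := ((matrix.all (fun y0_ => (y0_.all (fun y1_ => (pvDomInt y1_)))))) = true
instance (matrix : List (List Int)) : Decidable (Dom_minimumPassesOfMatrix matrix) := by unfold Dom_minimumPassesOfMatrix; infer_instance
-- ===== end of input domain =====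

-- B replaces A's BFS frontier queue (and its mutating 4-neighbour helper) by repeated
-- whole-grid sweeps from a snapshot; equivalence is about the return value (both Pythons
-- mutate `matrix` in place the same way).

-- ===== PORT A =====
-- shared indexing helpers (Python's matrix[i][j] reads/writes on in-range indices)
def get2 (M : List (List Int)) (i j : Nat) : Int := (M.getD i []).getD j 0

def set2 (M : List (List Int)) (i j : Nat) (v : Int) : List (List Int) :=
  M.modify i (fun row => row.modify j (fun _ => v))

def negCount (M : List (List Int)) : Nat :=
  (M.map (fun row => row.countP (fun v => decide (v < 0)))).sum

-- one conditional flip `if <guard> and matrix[t] < 0: matrix[t] *= -1; lst.append(t)`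
def flipStep (guard : Bool) (t : Nat × Nat) (st : List (Nat × Nat) × List (List Int)) :
    List (Nat × Nat) × List (List Int) :=
  if guard && decide (get2 st.2 t.1 t.2 < 0) then
    (st.1 ++ [t], set2 st.2 t.1 t.2 (-(get2 st.2 t.1 t.2)))
  else st

-- Python's add_to_list: the four guarded flips, in source order
def addToList (row col : Nat) (st : List (Nat × Nat) × List (List Int)) :
    List (Nat × Nat) × List (List Int) :=
  let st1 := flipStep (decide (1 ≤ row)) (row - 1, col) st
  let st2 := flipStep (decide (row + 1 < st1.2.length)) (row + 1, col) st1
  let st3 := flipStep (decide (col + 1 < (st2.2.getD 0 []).length)) (row, col + 1) st2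
  flipStep (decide (1 ≤ col)) (row, col - 1) st3

-- the inner `while queue: row, col = queue.popleft(); add_to_list(...)`
def processQueue (Q : List (Nat × Nat)) (M : List (List Int)) :
    List (Nat × Nat) × List (List Int) :=
  Q.foldl (fun st q => addToList q.1 q.2 st) ([], M)

-- the outer `while True:` of A; fuel (= one more than the number of negative cells,
-- which each counted pass strictly decreases) only makes the recursion structural
def aLoop (fuel : Nat) (Q : List (Nat × Nat)) (M : List (List Int)) (passes : Int) :
    Int × List (List Int) :=
  match fuel with
  | 0 => (passes, M)
  | fuel + 1 =>
    let res := processQueue Q M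
    if res.1 ≠ [] then aLoop fuel res.1 res.2 (passes + 1) else (passes, res.2)

-- the initial double loop filling the queue
def initQueue (M : List (List Int)) (r c : Nat) : List (Nat × Nat) :=
  (List.range r).flatMap (fun row =>
    ((List.range c).filter (fun col => decide (0 < get2 M row col))).map (fun col => (row, col)))

-- the final scan `return -1` on a remaining negative (shared by both ports)
def hasNeg (M : List (List Int)) (r c : Nat) : Bool :=
  (List.range r).any (fun i => (List.range c).any (fun j => decide (get2 M i j < 0)))

def minimumPassesOfMatrix (matrix : List (List Int)) : Int :=
  let r := matrix.length
  let c := (matrix.getD 0 []).length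
  let queue := initQueue matrix r c
  if queue.length = r * c then 0
  else
    let res := aLoop (negCount matrix + 1) queue matrix 0
    if hasNeg res.2 r c then -1 else res.1

-- ===== PORT B =====
-- Python B's `pos(i, j)` on the current matrix
def cellPos (M : List (List Int)) (r c : Nat) (i j : Int) : Bool :=
  decide (0 ≤ i) && decide (i < (r : Int)) && decide (0 ≤ j) && decide (j < (c : Int)) &&
    decide (0 < get2 M i.toNat j.toNat)

def adjPos (M : List (List Int)) (r c : Nat) (i j : Nat) : Bool :=
  cellPos M r c ((i : Int) - 1) j || cellPos M r c ((i : Int) + 1) j ||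
  cellPos M r c i ((j : Int) + 1) || cellPos M r c i ((j : Int) - 1)

def bNewVal (M : List (List Int)) (r c : Nat) (i j : Nat) : Int :=
  if get2 M i j < 0 ∧ adjPos M r c i j then -(get2 M i j) else get2 M i j

-- the `new = [[...] for i in range(r)]` comprehension
def bStep (M : List (List Int)) (r c : Nat) : List (List Int) :=
  (List.range r).map (fun i => (List.range c).map (fun j => bNewVal M r c i j))

-- `all(new[i][j] == matrix[i][j] ...)`
def bUnchanged (M new : List (List Int)) (r c : Nat) : Bool :=
  (List.range r).all (fun i => (List.range c).all (fun j => get2 new i j == get2 M i j))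

-- the in-place `matrix[i][:c] = new[i]` for i in range(r) (r = len(matrix))
def bApply (M new : List (List Int)) (c : Nat) : List (List Int) :=
  M.mapIdx (fun i row => new.getD i [] ++ row.drop c)

-- B's `while True:` sweep loop, with the same structural fuel guard
def bLoop (fuel : Nat) (r c : Nat) (M : List (List Int)) (passes : Int) :
    Int × List (List Int) :=
  match fuel with
  | 0 => (passes, M)
  | fuel + 1 =>
    let new := bStep M r c
    if bUnchanged M new r c then (passes, M)
    else bLoop fuel r c (bApply M new c) (passes + 1)

def minimumPassesOfMatrix_alt (matrix : List (List Int)) : Int :=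
  let r := matrix.length
  let c := (matrix.getD 0 []).length
  let res := bLoop (negCount matrix + 1) r c matrix 0
  if hasNeg res.2 r c then -1 else res.1

-- ===== PRECONDITION & SPEC =====
-- Pre_ excludes exactly the inputs where the Python A raises an IndexError: the empty
-- matrix (matrix[0]) and matrices with a row shorter than the first row (matrix[row][col]).
def Pre_minimumPassesOfMatrix (matrix : List (List Int)) : Prop :=
  matrix ≠ [] ∧ ∀ row ∈ matrix, (matrix.getD 0 []).length ≤ row.length
instance (matrix : List (List Int)) : Decidable (Pre_minimumPassesOfMatrix matrix) := by
  unfold Pre_minimumPassesOfMatrix; infer_instance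

def pvWitness_minimumPassesOfMatrix : List (List Int) := [[1, -1], [-2, -3]]

def Spec_minimumPassesOfMatrix (matrix : List (List Int)) (out : Int) : Prop := out = minimumPassesOfMatrix_alt matrix
instance (matrix : List (List Int)) (out : Int) : Decidable (Spec_minimumPassesOfMatrix matrix out) := by unfold Spec_minimumPassesOfMatrix; infer_instance

-- ===== CLAIM (what is proved, stated in full; the proofs are below) =====
def Claim_equal_minimumPassesOfMatrix : Prop := ∀ (matrix : List (List Int)), Dom_minimumPassesOfMatrix matrix → Pre_minimumPassesOfMatrix matrix → Spec_minimumPassesOfMatrix matrix (minimumPassesOfMatrix matrix)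

-- ===== LEMMAS AND PROOFS =====

theorem getD_of_le {α : Type} (l : List α) (d : α) (j : Nat) (h : l.length ≤ j) :
    l.getD j d = d := by
  simp [List.getD_eq_getElem?_getD, List.getElem?_eq_none h]

theorem getD_map_range (c : Nat) (f : Nat → Int) (j : Nat) (h : j < c) :
    ((List.range c).map f).getD j 0 = f j := by
  simp [List.getD_eq_getElem?_getD, List.getElem?_map, List.getElem?_range h]

theorem get2_neg_real (M : List (List Int)) (i j : Nat) (h : get2 M i j < 0) :
    i < M.length ∧ j < (M.getD i []).length := by
  constructor
  · by_contra hi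
    rw [get2, getD_of_le M [] i (by omega)] at h
    simp at h
  · by_contra hj
    rw [get2, getD_of_le (M.getD i []) 0 j (by omega)] at h
    omega

theorem bStep_getD_lt (M : List (List Int)) (r c : Nat) (i : Nat) (hi : i < r) :
    (bStep M r c).getD i [] = (List.range c).map (fun j => bNewVal M r c i j) := by
  simp [bStep, List.getD_eq_getElem?_getD, List.getElem?_map, List.getElem?_range hi]

theorem get2_bStep (M : List (List Int)) (r c : Nat) (i j : Nat) (hi : i < r) (hj : j < c) :
    get2 (bStep M r c) i j = bNewVal M r c i j := by
  rw [get2, bStep_getD_lt M r c i hi, getD_map_range c _ j hj]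

theorem countP_negflip (l : List Int) (j : Nat) (h : l.getD j 0 < 0) :
    (l.modify j (fun _ => -(l.getD j 0))).countP (fun v => decide (v < 0)) + 1 =
      l.countP (fun v => decide (v < 0)) := by
  induction l generalizing j with
  | nil => simp at h
  | cons a t ih =>
    cases j with
    | zero =>
      simp only [List.getD_cons_zero] at h ⊢
      simp [List.modify_zero_cons, List.countP_cons, h]
      omega
    | succ j =>
      simp only [List.getD_cons_succ] at h ⊢
      simp only [List.modify_succ_cons, List.countP_cons]
      have := ih j h
      omega

theorem negCount_cons (row : List Int) (rest : List (List Int)) :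
    negCount (row :: rest) = row.countP (fun v => decide (v < 0)) + negCount rest := by
  simp [negCount]

theorem negCount_flip (M : List (List Int)) (i j : Nat) (h : get2 M i j < 0) :
    negCount (set2 M i j (-(get2 M i j))) + 1 = negCount M := by
  induction M generalizing i with
  | nil => simp [get2] at h
  | cons row rest ih =>
    cases i with
    | zero =>
      simp only [get2, List.getD_cons_zero] at h ⊢
      simp only [set2, List.modify_zero_cons, negCount_cons]
      have := countP_negflip row j h
      omega
    | succ i =>
      simp only [get2, List.getD_cons_succ] at h ⊢
      have := ih i h
      simp only [set2, get2] at this ⊢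
      simp only [List.modify_succ_cons, negCount_cons]
      omega

theorem negCount_flipStep (b : Bool) (t : Nat × Nat) (st : List (Nat × Nat) × List (List Int)) :
    negCount (flipStep b t st).2 + (flipStep b t st).1.length = negCount st.2 + st.1.length := by
  unfold flipStep
  split
  · rename_i hc
    simp only [Bool.and_eq_true, decide_eq_true_eq] at hc
    have := negCount_flip st.2 t.1 t.2 hc.2
    simp only [List.length_append, List.length_cons, List.length_nil]
    omega
  · rfl

theorem negCount_addToList (row col : Nat) (st : List (Nat × Nat) × List (List Int)) :
    negCount (addToList row col st).2 + (addToList row col st).1.length =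
      negCount st.2 + st.1.length := by
  simp only [addToList]
  have h1 := negCount_flipStep (decide (1 ≤ row)) (row - 1, col) st
  set st1 := flipStep (decide (1 ≤ row)) (row - 1, col) st with hst1
  have h2 := negCount_flipStep (decide (row + 1 < st1.2.length)) (row + 1, col) st1
  set st2 := flipStep (decide (row + 1 < st1.2.length)) (row + 1, col) st1 with hst2
  have h3 := negCount_flipStep (decide (col + 1 < (st2.2.getD 0 []).length)) (row, col + 1) st2
  set st3 := flipStep (decide (col + 1 < (st2.2.getD 0 []).length)) (row, col + 1) st2 with hst3
  have h4 := negCount_flipStep (decide (1 ≤ col)) (row, col - 1) st3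
  omega

theorem negCount_foldl (Q : List (Nat × Nat)) (st : List (Nat × Nat) × List (List Int)) :
    negCount (Q.foldl (fun st q => addToList q.1 q.2 st) st).2 +
      (Q.foldl (fun st q => addToList q.1 q.2 st) st).1.length = negCount st.2 + st.1.length := by
  induction Q generalizing st with
  | nil => rfl
  | cons q Q ih =>
    simp only [List.foldl_cons]
    have h := negCount_addToList q.1 q.2 st
    have := ih (addToList q.1 q.2 st)
    omega

theorem negCount_processQueue (Q : List (Nat × Nat)) (M : List (List Int)) :
    negCount (processQueue Q M).2 + (processQueue Q M).1.length = negCount M := by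
  have := negCount_foldl Q ([], M)
  simpa [processQueue] using this

theorem negCount_processQueue_lt (Q : List (Nat × Nat)) (M : List (List Int))
    (h : (processQueue Q M).1 ≠ []) : negCount (processQueue Q M).2 < negCount M := by
  have := negCount_processQueue Q M
  have : 0 < (processQueue Q M).1.length := List.length_pos_of_ne_nil h
  omega



-- shape of a matrix: r rows, first row of length c, no row shorter than c
def Shape (r c : Nat) (M : List (List Int)) : Prop :=
  M.length = r ∧ (M.getD 0 []).length = c ∧ ∀ row ∈ M, c ≤ row.length

-- p is a cell that add_to_list called at q would inspect (the four guarded neighbours)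
def Nbr (r c : Nat) (q p : Nat × Nat) : Prop :=
  (1 ≤ q.1 ∧ p = (q.1 - 1, q.2)) ∨ (q.1 + 1 < r ∧ p = (q.1 + 1, q.2)) ∨
  (q.2 + 1 < c ∧ p = (q.1, q.2 + 1)) ∨ (1 ≤ q.2 ∧ p = (q.1, q.2 - 1))

-- M' is M with exactly the negative cells in S sign-flipped
def FlipChar (M M' : List (List Int)) (S : Nat × Nat → Prop) : Prop :=
  M'.length = M.length ∧ (∀ i, (M'.getD i []).length = (M.getD i []).length) ∧
  ∀ p : Nat × Nat,
    (get2 M p.1 p.2 < 0 ∧ S p → get2 M' p.1 p.2 = -(get2 M p.1 p.2)) ∧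
    (¬(get2 M p.1 p.2 < 0 ∧ S p) → get2 M' p.1 p.2 = get2 M p.1 p.2)

def SChar (st st' : List (Nat × Nat) × List (List Int)) (S : Nat × Nat → Prop) : Prop :=
  FlipChar st.2 st'.2 S ∧ ∀ p, p ∈ st'.1 ↔ p ∈ st.1 ∨ (get2 st.2 p.1 p.2 < 0 ∧ S p)

theorem getD_modify_outer (M : List (List Int)) (i i' : Nat) (f : List Int → List Int)
    (hf : f [] = []) :
    (M.modify i f).getD i' [] = if i = i' then f (M.getD i' []) else M.getD i' [] := by
  simp only [List.getD_eq_getElem?_getD, List.getElem?_modify]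
  by_cases h : i = i'
  · subst h
    cases hm : M[i]? <;> simp [hf]
  · cases hm : M[i']? <;> simp [h]

theorem getD_set_inner (l : List Int) (j : Nat) (v : Int) (j' : Nat) (hj : j < l.length) :
    (l.modify j (fun _ => v)).getD j' 0 = if j' = j then v else l.getD j' 0 := by
  simp only [List.getD_eq_getElem?_getD, List.getElem?_modify]
  by_cases h : j = j'
  · subst h
    simp [List.getElem?_eq_getElem hj]
  · cases hm : l[j']? <;> simp [h, Ne.symm h]

theorem set2_length (M : List (List Int)) (i j : Nat) (v : Int) :
    (set2 M i j v).length = M.length := by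
  simp [set2]

theorem set2_row_length (M : List (List Int)) (i j : Nat) (v : Int) (i' : Nat) :
    ((set2 M i j v).getD i' []).length = (M.getD i' []).length := by
  rw [set2, getD_modify_outer _ _ _ _ (by simp)]
  split <;> simp

theorem get2_set2 (M : List (List Int)) (i j : Nat) (v : Int)
    (hreal : j < (M.getD i []).length) (i' j' : Nat) :
    get2 (set2 M i j v) i' j' = if i' = i ∧ j' = j then v else get2 M i' j' := by
  unfold get2 set2
  rw [getD_modify_outer _ _ _ _ (by simp)]
  by_cases hi : i = i'
  · subst hi
    rw [if_pos rfl, getD_set_inner _ _ _ _ hreal]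
    by_cases hj : j' = j
    · simp [hj]
    · simp [hj]
  · rw [if_neg hi, if_neg (by intro hc; exact hi hc.1.symm)]

theorem flipStep_SChar (b : Bool) (t : Nat × Nat) (st : List (Nat × Nat) × List (List Int)) :
    SChar st (flipStep b t st) (fun p => b = true ∧ p = t) := by
  unfold flipStep
  split
  · rename_i hfire
    simp only [Bool.and_eq_true, decide_eq_true_eq] at hfire
    obtain ⟨hb, hneg⟩ := hfire
    have hreal := get2_neg_real st.2 t.1 t.2 hneg
    refine ⟨⟨set2_length _ _ _ _, fun i => set2_row_length _ _ _ _ _, fun p => ?_⟩, fun p => ?_⟩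
    · rw [get2_set2 st.2 t.1 t.2 _ hreal.2 p.1 p.2]
      constructor
      · rintro ⟨hpneg, _, hpt⟩
        rw [if_pos ⟨by rw [hpt], by rw [hpt]⟩]
        rw [hpt]
      · intro hnot
        by_cases hpt : p = t
        · exact absurd ⟨by rw [hpt]; exact hneg, hb, hpt⟩ hnot
        · rw [if_neg (by
            rintro ⟨h1, h2⟩
            exact hpt (Prod.ext h1 h2))]
    · simp only [List.mem_append, List.mem_singleton]
      constructor
      · rintro (hin | hpt)
        · exact Or.inl hin
        · exact Or.inr ⟨by rw [hpt]; exact hneg, hb, hpt⟩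
      · rintro (hin | ⟨_, _, hpt⟩)
        · exact Or.inl hin
        · exact Or.inr hpt
  · rename_i hnof
    refine ⟨⟨rfl, fun i => rfl, fun p => ?_⟩, fun p => ?_⟩
    · refine ⟨?_, fun _ => rfl⟩
      rintro ⟨hpneg, hb, hpt⟩
      exfalso
      apply hnof
      simp only [Bool.and_eq_true, decide_eq_true_eq]
      exact ⟨hb, by rw [← hpt]; exact hpneg⟩
    · constructor
      · exact fun h => Or.inl h
      · rintro (hin | ⟨hpneg, hb, hpt⟩)
        · exact hin
        · exfalso
          apply hnof
          simp only [Bool.and_eq_true, decide_eq_true_eq]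
          exact ⟨hb, by rw [← hpt]; exact hpneg⟩

theorem SChar_congr (st st' : List (Nat × Nat) × List (List Int)) (S S' : Nat × Nat → Prop)
    (h : ∀ p, S p ↔ S' p) (hc : SChar st st' S) : SChar st st' S' := by
  obtain ⟨⟨hl, hrl, hpt⟩, hlst⟩ := hc
  refine ⟨⟨hl, hrl, fun p => ?_⟩, fun p => ?_⟩
  · obtain ⟨h1, h2⟩ := hpt p
    exact ⟨fun hh => h1 ⟨hh.1, (h p).mpr hh.2⟩,
      fun hh => h2 (fun hh2 => hh ⟨hh2.1, (h p).mp hh2.2⟩)⟩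
  · rw [hlst p]
    constructor
    · rintro (a | ⟨b1, b2⟩)
      · exact Or.inl a
      · exact Or.inr ⟨b1, (h p).mp b2⟩
    · rintro (a | ⟨b1, b2⟩)
      · exact Or.inl a
      · exact Or.inr ⟨b1, (h p).mpr b2⟩

theorem SChar_comp (st₀ st₁ st₂ : List (Nat × Nat) × List (List Int))
    (S₁ S₂ : Nat × Nat → Prop)
    (h₁ : SChar st₀ st₁ S₁) (h₂ : SChar st₁ st₂ S₂) :
    SChar st₀ st₂ (fun p => S₁ p ∨ S₂ p) := by
  obtain ⟨⟨hl1, hrl1, hpt1⟩, hlst1⟩ := h₁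
  obtain ⟨⟨hl2, hrl2, hpt2⟩, hlst2⟩ := h₂
  refine ⟨⟨hl2.trans hl1, fun i => (hrl2 i).trans (hrl1 i), fun p => ?_⟩, fun p => ?_⟩
  · obtain ⟨f1, g1⟩ := hpt1 p
    obtain ⟨f2, g2⟩ := hpt2 p
    by_cases hneg : get2 st₀.2 p.1 p.2 < 0
    · by_cases hs1 : S₁ p
      · have e1 : get2 st₁.2 p.1 p.2 = -(get2 st₀.2 p.1 p.2) := f1 ⟨hneg, hs1⟩
        have e2 : get2 st₂.2 p.1 p.2 = get2 st₁.2 p.1 p.2 := g2 (by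
          rintro ⟨hn2, _⟩
          rw [e1] at hn2
          omega)
        constructor
        · intro _; rw [e2, e1]
        · rintro hno; exact absurd ⟨hneg, Or.inl hs1⟩ hno
      · have e1 : get2 st₁.2 p.1 p.2 = get2 st₀.2 p.1 p.2 := g1 (by tauto)
        by_cases hs2 : S₂ p
        · have e2 : get2 st₂.2 p.1 p.2 = -(get2 st₁.2 p.1 p.2) := f2 ⟨by rw [e1]; exact hneg, hs2⟩
          constructor
          · intro _; rw [e2, e1]
          · rintro hno; exact absurd ⟨hneg, Or.inr hs2⟩ hno
        · have e2 : get2 st₂.2 p.1 p.2 = get2 st₁.2 p.1 p.2 := g2 (by tauto)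
          constructor
          · rintro ⟨_, hs | hs⟩
            · exact absurd hs hs1
            · exact absurd hs hs2
          · intro _; rw [e2, e1]
    · have e1 : get2 st₁.2 p.1 p.2 = get2 st₀.2 p.1 p.2 := g1 (by tauto)
      have e2 : get2 st₂.2 p.1 p.2 = get2 st₁.2 p.1 p.2 := g2 (by
        rintro ⟨hn2, _⟩
        rw [e1] at hn2
        exact hneg hn2)
      constructor
      · rintro ⟨hn, _⟩; exact absurd hn hneg
      · intro _; rw [e2, e1]
  · rw [hlst2 p, hlst1 p]
    obtain ⟨f1, g1⟩ := hpt1 p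
    constructor
    · rintro ((a | ⟨b1, b2⟩) | ⟨c1, c2⟩)
      · exact Or.inl a
      · exact Or.inr ⟨b1, Or.inl b2⟩
      · by_cases hs1 : S₁ p
        · by_cases hneg : get2 st₀.2 p.1 p.2 < 0
          · exact Or.inr ⟨hneg, Or.inl hs1⟩
          · have e1 : get2 st₁.2 p.1 p.2 = get2 st₀.2 p.1 p.2 := g1 (by tauto)
            rw [e1] at c1
            exact Or.inr ⟨c1, Or.inr c2⟩
        · have e1 : get2 st₁.2 p.1 p.2 = get2 st₀.2 p.1 p.2 := g1 (by tauto)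
          rw [e1] at c1
          exact Or.inr ⟨c1, Or.inr c2⟩
    · rintro (a | ⟨b1, b2 | b2⟩)
      · exact Or.inl (Or.inl a)
      · exact Or.inl (Or.inr ⟨b1, b2⟩)
      · by_cases hs1 : S₁ p
        · exact Or.inl (Or.inr ⟨b1, hs1⟩)
        · have e1 : get2 st₁.2 p.1 p.2 = get2 st₀.2 p.1 p.2 := g1 (by tauto)
          exact Or.inr ⟨by rw [e1]; exact b1, b2⟩


theorem addToList_SChar (r c row col : Nat) (st : List (Nat × Nat) × List (List Int))
    (hr : st.2.length = r) (hc : (st.2.getD 0 []).length = c) :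
    SChar st (addToList row col st) (fun p => Nbr r c (row, col) p) := by
  simp only [addToList]
  have s1 := flipStep_SChar (decide (1 ≤ row)) (row - 1, col) st
  set st1 := flipStep (decide (1 ≤ row)) (row - 1, col) st with hst1
  have hr1 : st1.2.length = r := s1.1.1.trans hr
  have hc1 : (st1.2.getD 0 []).length = c := (s1.1.2.1 0).trans hc
  rw [hr1]
  have s2 := flipStep_SChar (decide (row + 1 < r)) (row + 1, col) st1
  set st2 := flipStep (decide (row + 1 < r)) (row + 1, col) st1 with hst2
  have hc2 : (st2.2.getD 0 []).length = c := (s2.1.2.1 0).trans hc1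
  rw [hc2]
  have s3 := flipStep_SChar (decide (col + 1 < c)) (row, col + 1) st2
  set st3 := flipStep (decide (col + 1 < c)) (row, col + 1) st2 with hst3
  have s4 := flipStep_SChar (decide (1 ≤ col)) (row, col - 1) st3
  have comp12 := SChar_comp _ _ _ _ _ s1 s2
  have comp123 := SChar_comp _ _ _ _ _ comp12 s3
  have comp := SChar_comp _ _ _ _ _ comp123 s4
  refine SChar_congr _ _ _ _ (fun p => ?_) comp
  simp only [decide_eq_true_eq, Nbr]
  constructor
  · rintro (((⟨h1, h2⟩ | ⟨h1, h2⟩) | ⟨h1, h2⟩) | ⟨h1, h2⟩)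
    · exact Or.inl ⟨h1, h2⟩
    · exact Or.inr (Or.inl ⟨h1, h2⟩)
    · exact Or.inr (Or.inr (Or.inl ⟨h1, h2⟩))
    · exact Or.inr (Or.inr (Or.inr ⟨h1, h2⟩))
  · rintro (⟨h1, h2⟩ | ⟨h1, h2⟩ | ⟨h1, h2⟩ | ⟨h1, h2⟩)
    · exact Or.inl (Or.inl (Or.inl ⟨h1, h2⟩))
    · exact Or.inl (Or.inl (Or.inr ⟨h1, h2⟩))
    · exact Or.inl (Or.inr ⟨h1, h2⟩)
    · exact Or.inr ⟨h1, h2⟩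

theorem foldl_SChar (r c : Nat) : ∀ (Q : List (Nat × Nat)) (st : List (Nat × Nat) × List (List Int)),
    st.2.length = r → (st.2.getD 0 []).length = c →
    SChar st (Q.foldl (fun st q => addToList q.1 q.2 st) st)
      (fun p => ∃ q ∈ Q, Nbr r c q p) := by
  intro Q
  induction Q with
  | nil =>
    intro st hr hc
    refine ⟨⟨rfl, fun i => rfl, fun p => ⟨?_, fun _ => rfl⟩⟩, fun p => ?_⟩
    · rintro ⟨_, q, hq, _⟩
      simp at hq
    · simp only [List.foldl_nil]
      constructor
      · exact fun h => Or.inl h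
      · rintro (h | ⟨_, q, hq, _⟩)
        · exact h
        · simp at hq
  | cons q Q ih =>
    intro st hr hc
    simp only [List.foldl_cons]
    have a1 := addToList_SChar r c q.1 q.2 st hr hc
    have hr1 : (addToList q.1 q.2 st).2.length = r := a1.1.1.trans hr
    have hc1 : ((addToList q.1 q.2 st).2.getD 0 []).length = c := (a1.1.2.1 0).trans hc
    have rest := ih (addToList q.1 q.2 st) hr1 hc1
    have comp := SChar_comp _ _ _ _ _ a1 rest
    refine SChar_congr _ _ _ _ (fun p => ?_) comp
    constructor
    · rintro (h | ⟨q', hq', hn⟩)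
      · exact ⟨q, List.mem_cons_self .., h⟩
      · exact ⟨q', List.mem_cons_of_mem q hq', hn⟩
    · rintro ⟨q', hq', hn⟩
      rcases List.mem_cons.mp hq' with rfl | hq'
      · exact Or.inl hn
      · exact Or.inr ⟨q', hq', hn⟩

theorem processQueue_SChar (r c : Nat) (Q : List (Nat × Nat)) (M : List (List Int))
    (hr : M.length = r) (hc : (M.getD 0 []).length = c) :
    SChar ([], M) (processQueue Q M) (fun p => ∃ q ∈ Q, Nbr r c q p) :=
  foldl_SChar r c Q ([], M) hr hc

-- bridges between Nbr (A's frontier view) and adjPos (B's snapshot view)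
theorem cellPos_iff (M : List (List Int)) (r c : Nat) (i j : Int) :
    cellPos M r c i j = true ↔
      0 ≤ i ∧ i < (r : Int) ∧ 0 ≤ j ∧ j < (c : Int) ∧ 0 < get2 M i.toNat j.toNat := by
  simp [cellPos, and_assoc]

theorem cellPos_of_cell (M : List (List Int)) (r c : Nat) (q : Nat × Nat)
    (hq1 : q.1 < r) (hq2 : q.2 < c) (hpos : 0 < get2 M q.1 q.2)
    (i j : Int) (hi : i = (q.1 : Int)) (hj : j = (q.2 : Int)) :
    cellPos M r c i j = true := by
  subst hi
  subst hj
  rw [cellPos_iff]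
  refine ⟨by omega, by omega, by omega, by omega, ?_⟩
  simpa using hpos

theorem adjPos_of_Nbr (M : List (List Int)) (r c : Nat) (q p : Nat × Nat)
    (hq1 : q.1 < r) (hq2 : q.2 < c) (hpos : 0 < get2 M q.1 q.2)
    (hn : Nbr r c q p) : adjPos M r c p.1 p.2 = true := by
  simp only [adjPos, Bool.or_eq_true]
  rcases hn with ⟨h1, hp⟩ | ⟨h1, hp⟩ | ⟨h1, hp⟩ | ⟨h1, hp⟩ <;> subst hp
  · exact Or.inl (Or.inl (Or.inr (cellPos_of_cell M r c q hq1 hq2 hpos _ _ (by omega) (by omega))))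
  · exact Or.inl (Or.inl (Or.inl (cellPos_of_cell M r c q hq1 hq2 hpos _ _ (by omega) (by omega))))
  · exact Or.inr (cellPos_of_cell M r c q hq1 hq2 hpos _ _ (by omega) (by omega))
  · exact Or.inl (Or.inr (cellPos_of_cell M r c q hq1 hq2 hpos _ _ (by omega) (by omega)))

theorem nbr_ranges (r c : Nat) (q p : Nat × Nat) (hq1 : q.1 < r) (hq2 : q.2 < c)
    (hn : Nbr r c q p) : p.1 < r ∧ p.2 < c := by
  rcases hn with ⟨h1, hp⟩ | ⟨h1, hp⟩ | ⟨h1, hp⟩ | ⟨h1, hp⟩ <;> subst hp <;>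
    exact ⟨by simp; omega, by simp; omega⟩

theorem adjPos_elim (M : List (List Int)) (r c : Nat) (i j : Nat)
    (hi : i < r) (hj : j < c) (h : adjPos M r c i j = true) :
    ∃ n : Nat × Nat, n.1 < r ∧ n.2 < c ∧ 0 < get2 M n.1 n.2 ∧ Nbr r c n (i, j) := by
  simp only [adjPos, Bool.or_eq_true] at h
  rcases h with ((h | h) | h) | h <;> rw [cellPos_iff] at h <;>
    obtain ⟨h0, h1, h2, h3, h4⟩ := h
  · refine ⟨(i - 1, j), by omega, by omega, ?_, ?_⟩
    · have e1 : ((i : Int) - 1).toNat = i - 1 := by omega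
      have e2 : ((j : Int)).toNat = j := by omega
      rwa [e1, e2] at h4
    · exact Or.inr (Or.inl ⟨by omega, by
        have : i - 1 + 1 = i := by omega
        simp [this]⟩)
  · refine ⟨(i + 1, j), by omega, by omega, ?_, ?_⟩
    · have e1 : ((i : Int) + 1).toNat = i + 1 := by omega
      have e2 : ((j : Int)).toNat = j := by omega
      rwa [e1, e2] at h4
    · exact Or.inl ⟨by omega, by simp⟩
  · refine ⟨(i, j + 1), by omega, by omega, ?_, ?_⟩
    · have e1 : ((i : Int)).toNat = i := by omega
      have e2 : ((j : Int) + 1).toNat = j + 1 := by omega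
      rwa [e1, e2] at h4
    · exact Or.inr (Or.inr (Or.inr ⟨by omega, by simp⟩))
  · refine ⟨(i, j - 1), by omega, by omega, ?_, ?_⟩
    · have e1 : ((i : Int)).toNat = i := by omega
      have e2 : ((j : Int) - 1).toNat = j - 1 := by omega
      rwa [e1, e2] at h4
    · exact Or.inr (Or.inr (Or.inl ⟨by omega, by
        have : j - 1 + 1 = j := by omega
        simp [this]⟩))

-- the BFS invariant: the queue consists of positive in-range cells, and every negative
-- cell next to a positive in-range cell is next to a queue cell
def BfsInv (r c : Nat) (M : List (List Int)) (Q : List (Nat × Nat)) : Prop :=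
  (∀ q ∈ Q, q.1 < r ∧ q.2 < c ∧ 0 < get2 M q.1 q.2) ∧
  (∀ i j : Nat, i < r → j < c → get2 M i j < 0 → adjPos M r c i j = true →
    ∃ q ∈ Q, Nbr r c q (i, j))

-- matrices agreeing in shape and through get2 are equal
theorem row_ext (l₁ l₂ : List Int) (hlen : l₁.length = l₂.length)
    (h : ∀ j, l₁.getD j 0 = l₂.getD j 0) : l₁ = l₂ := by
  apply List.ext_getElem hlen
  intro j h1 h2
  have := h j
  rwa [List.getD_eq_getElem?_getD, List.getD_eq_getElem?_getD,
    List.getElem?_eq_getElem h1, List.getElem?_eq_getElem h2] at this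

theorem mat_ext (M₁ M₂ : List (List Int)) (hlen : M₁.length = M₂.length)
    (hrow : ∀ i, (M₁.getD i []).length = (M₂.getD i []).length)
    (hcell : ∀ i j, get2 M₁ i j = get2 M₂ i j) : M₁ = M₂ := by
  apply List.ext_getElem hlen
  intro i h1 h2
  have hr : M₁[i] = M₁.getD i [] := by
    simp [List.getD_eq_getElem?_getD, List.getElem?_eq_getElem h1]
  have hr2 : M₂[i] = M₂.getD i [] := by
    simp [List.getD_eq_getElem?_getD, List.getElem?_eq_getElem h2]
  rw [hr, hr2]
  apply row_ext _ _ (hrow i)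
  intro j
  exact hcell i j

-- get2 / shape of bApply (B's in-place slice assignment)
theorem bApply_length (M new : List (List Int)) (c : Nat) :
    (bApply M new c).length = M.length := by
  simp [bApply]

theorem bApply_getD_lt (M new : List (List Int)) (c : Nat) (i : Nat) (hi : i < M.length) :
    (bApply M new c).getD i [] = new.getD i [] ++ M[i].drop c := by
  have hi2 : i < (bApply M new c).length := by simpa [bApply] using hi
  rw [List.getD_eq_getElem?_getD, List.getElem?_eq_getElem hi2]
  simp [bApply, List.getElem_mapIdx]

theorem bApply_getD_ge (M new : List (List Int)) (c : Nat) (i : Nat) (hi : M.length ≤ i) :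
    (bApply M new c).getD i [] = [] := by
  rw [List.getD_eq_getElem?_getD, List.getElem?_eq_none (by simpa [bApply] using hi)]
  rfl

theorem getD_append_getD (l₁ l₂ : List Int) (j : Nat) :
    (l₁ ++ l₂).getD j 0 = if j < l₁.length then l₁.getD j 0 else l₂.getD (j - l₁.length) 0 := by
  by_cases h : j < l₁.length
  · rw [if_pos h, List.getD_eq_getElem?_getD, List.getElem?_append_left h,
      List.getD_eq_getElem?_getD]
  · rw [if_neg h, List.getD_eq_getElem?_getD, List.getElem?_append_right (by omega),
      List.getD_eq_getElem?_getD]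

theorem getD_drop (l : List Int) (c k : Nat) :
    (l.drop c).getD k 0 = l.getD (c + k) 0 := by
  rw [List.getD_eq_getElem?_getD, List.getD_eq_getElem?_getD, List.getElem?_drop]

theorem get2_bApplyStep (M : List (List Int)) (r c : Nat) (hS : Shape r c M) (i j : Nat) :
    get2 (bApply M (bStep M r c) c) i j =
      if i < r ∧ j < c then bNewVal M r c i j else get2 M i j := by
  obtain ⟨hlen, hc0, hrows⟩ := hS
  by_cases hi : i < M.length
  · rw [get2, bApply_getD_lt M _ c i hi, getD_append_getD]
    have hgetrow : M[i] = M.getD i [] := by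
      simp [List.getD_eq_getElem?_getD, List.getElem?_eq_getElem hi]
    have hclen : c ≤ M[i].length := hrows M[i] (List.getElem_mem hi)
    by_cases hj : j < c
    · rw [bStep_getD_lt M r c i (by omega), if_pos (by simpa using hj), getD_map_range c _ j hj,
        if_pos ⟨by omega, hj⟩]
    · rw [bStep_getD_lt M r c i (by omega), if_neg (by simpa using hj),
        if_neg (fun hx => hj hx.2)]
      simp only [List.length_map, List.length_range]
      rw [getD_drop, get2, hgetrow]
      congr 1
      omega
  · rw [get2, bApply_getD_ge M _ c i (by omega)]
    rw [if_neg (fun hx => hi (by omega))]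
    rw [get2, getD_of_le M [] i (by omega)]

theorem bApply_row_length (M : List (List Int)) (r c : Nat) (hS : Shape r c M) (i : Nat) :
    ((bApply M (bStep M r c) c).getD i []).length = (M.getD i []).length := by
  obtain ⟨hlen, hc0, hrows⟩ := hS
  by_cases hi : i < M.length
  · rw [bApply_getD_lt M _ c i hi, List.length_append, bStep_getD_lt M r c i (by omega)]
    have hgetrow : M[i] = M.getD i [] := by
      simp [List.getD_eq_getElem?_getD, List.getElem?_eq_getElem hi]
    have hclen : c ≤ M[i].length := hrows M[i] (List.getElem_mem hi)
    rw [hgetrow] at hclen ⊢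
    simp only [List.length_map, List.length_range, List.length_drop]
    omega
  · rw [bApply_getD_ge M _ c i (by omega), getD_of_le M [] i (by omega)]


theorem bNewVal_eq_iff (M : List (List Int)) (r c i j : Nat) :
    bNewVal M r c i j = get2 M i j ↔ ¬(get2 M i j < 0 ∧ adjPos M r c i j = true) := by
  unfold bNewVal
  by_cases h : get2 M i j < 0 ∧ adjPos M r c i j = true
  · rw [if_pos h]
    constructor
    · intro he
      exfalso
      have := h.1
      omega
    · intro hn
      exact absurd h hn
  · rw [if_neg h]
    exact ⟨fun _ => h, fun _ => rfl⟩

theorem bUnchanged_iff (M : List (List Int)) (r c : Nat) :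
    bUnchanged M (bStep M r c) r c = true ↔
      ∀ i j : Nat, i < r → j < c → ¬(get2 M i j < 0 ∧ adjPos M r c i j = true) := by
  unfold bUnchanged
  simp only [List.all_eq_true, List.mem_range, beq_iff_eq]
  constructor
  · intro h i j hi hj
    exact (bNewVal_eq_iff M r c i j).mp (by rw [← get2_bStep M r c i j hi hj]; exact h i hi j hj)
  · intro h i hi j hj
    rw [get2_bStep M r c i j hi hj]
    exact (bNewVal_eq_iff M r c i j).mpr (h i j hi hj)

theorem shape_row_le (r c : Nat) (M : List (List Int)) (hS : Shape r c M) (i : Nat)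
    (hi : i < M.length) : c ≤ (M.getD i []).length := by
  have : M.getD i [] = M[i] := by
    simp [List.getD_eq_getElem?_getD, List.getElem?_eq_getElem hi]
  rw [this]
  exact hS.2.2 M[i] (List.getElem_mem hi)

theorem shape_from_getD (r c : Nat) (M : List (List Int)) (hlen : M.length = r)
    (hc0 : (M.getD 0 []).length = c) (h : ∀ i, i < r → c ≤ (M.getD i []).length) :
    Shape r c M := by
  refine ⟨hlen, hc0, ?_⟩
  intro row hrow
  obtain ⟨i, hi, rfl⟩ := List.mem_iff_getElem.mp hrow
  have : M[i] = M.getD i [] := by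
    simp [List.getD_eq_getElem?_getD, List.getElem?_eq_getElem hi]
  rw [this]
  exact h i (by omega)

theorem step_main (r c : Nat) (M : List (List Int)) (Q : List (Nat × Nat))
    (hS : Shape r c M) (hI : BfsInv r c M Q) :
    (processQueue Q M).2 = bApply M (bStep M r c) c ∧
    ((processQueue Q M).1 = [] ↔ bUnchanged M (bStep M r c) r c = true) ∧
    Shape r c (processQueue Q M).2 ∧
    BfsInv r c (processQueue Q M).2 (processQueue Q M).1 := by
  obtain ⟨hlen, hc0, hrows⟩ := hS
  obtain ⟨⟨hl, hrl, hpt⟩, hlst⟩ := processQueue_SChar r c Q M hlen hc0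
  simp only at hl hrl hpt hlst
  have hCiff : ∀ p : Nat × Nat, (get2 M p.1 p.2 < 0 ∧ ∃ q ∈ Q, Nbr r c q p) ↔
      (p.1 < r ∧ p.2 < c ∧ get2 M p.1 p.2 < 0 ∧ adjPos M r c p.1 p.2 = true) := by
    intro p
    constructor
    · rintro ⟨hneg, q, hq, hn⟩
      obtain ⟨hq1, hq2, hq3⟩ := hI.1 q hq
      obtain ⟨hp1, hp2⟩ := nbr_ranges r c q p hq1 hq2 hn
      exact ⟨hp1, hp2, hneg, adjPos_of_Nbr M r c q p hq1 hq2 hq3 hn⟩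
    · rintro ⟨hp1, hp2, hneg, hadj⟩
      exact ⟨hneg, hI.2 p.1 p.2 hp1 hp2 hneg hadj⟩
  have hmem : ∀ p : Nat × Nat, p ∈ (processQueue Q M).1 ↔
      (get2 M p.1 p.2 < 0 ∧ ∃ q ∈ Q, Nbr r c q p) := by
    intro p
    rw [hlst p]
    constructor
    · rintro (h | h)
      · simp at h
      · exact h
    · exact fun h => Or.inr h
  have hcell : ∀ i j : Nat, get2 (processQueue Q M).2 i j =
      get2 (bApply M (bStep M r c) c) i j := by
    intro i j
    rw [get2_bApplyStep M r c ⟨hlen, hc0, hrows⟩ i j]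
    obtain ⟨hflip, hkeep⟩ := hpt (i, j)
    by_cases hC : get2 M i j < 0 ∧ ∃ q ∈ Q, Nbr r c q (i, j)
    · obtain ⟨h1, h2, h3, h4⟩ := (hCiff (i, j)).mp hC
      rw [hflip hC, if_pos ⟨h1, h2⟩]
      unfold bNewVal
      rw [if_pos ⟨h3, h4⟩]
    · rw [hkeep hC]
      by_cases hij : i < r ∧ j < c
      · rw [if_pos hij]
        symm
        rw [bNewVal_eq_iff]
        intro hcon
        exact hC ((hCiff (i, j)).mpr ⟨hij.1, hij.2, hcon.1, hcon.2⟩)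
      · rw [if_neg hij]
  have hmeq : (processQueue Q M).2 = bApply M (bStep M r c) c := by
    apply mat_ext
    · rw [hl, bApply_length]
    · intro i
      rw [hrl i, bApply_row_length M r c ⟨hlen, hc0, hrows⟩ i]
    · exact hcell
  have hempty : (processQueue Q M).1 = [] ↔ bUnchanged M (bStep M r c) r c = true := by
    rw [bUnchanged_iff, List.eq_nil_iff_forall_not_mem]
    constructor
    · intro h i j hi hj hcon
      exact h (i, j) ((hmem (i, j)).mpr ((hCiff (i, j)).mpr ⟨hi, hj, hcon.1, hcon.2⟩))
    · intro h p hp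
      obtain ⟨h1, h2, h3, h4⟩ := (hCiff p).mp ((hmem p).mp hp)
      exact h p.1 p.2 h1 h2 ⟨h3, h4⟩
  have hShape' : Shape r c (processQueue Q M).2 := by
    apply shape_from_getD
    · rw [hl, hlen]
    · rw [hrl 0, hc0]
    · intro i hi
      rw [hrl i]
      exact shape_row_le r c M ⟨hlen, hc0, hrows⟩ i (by omega)
  refine ⟨hmeq, hempty, hShape', ?_, ?_⟩
  · -- queue cells are in-range and positive in the new matrix
    intro p hp
    have hC := (hmem p).mp hp
    obtain ⟨h1, h2, h3, _⟩ := (hCiff p).mp hC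
    refine ⟨h1, h2, ?_⟩
    rw [(hpt p).1 hC]
    omega
  · -- frontier coverage in the new matrix
    intro i j hi hj hneg' hadj'
    have hkeepC : ¬(get2 M i j < 0 ∧ ∃ q ∈ Q, Nbr r c q (i, j)) := by
      intro hC
      have := (hpt (i, j)).1 hC
      have h3 := hC.1
      simp only at this
      omega
    have hvalsame : get2 (processQueue Q M).2 i j = get2 M i j := (hpt (i, j)).2 hkeepC
    have hnegM : get2 M i j < 0 := by rwa [hvalsame] at hneg'
    obtain ⟨n, hn1, hn2, hn3, hnb⟩ := adjPos_elim (processQueue Q M).2 r c i j hi hj hadj'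
    by_cases hCn : get2 M n.1 n.2 < 0 ∧ ∃ q ∈ Q, Nbr r c q n
    · exact ⟨n, (hmem n).mpr hCn, hnb⟩
    · exfalso
      have hnM : 0 < get2 M n.1 n.2 := by
        rw [← (hpt n).2 hCn]
        exact hn3
      have hadjM : adjPos M r c i j = true := adjPos_of_Nbr M r c n (i, j) hn1 hn2 hnM hnb
      obtain ⟨q, hq, hnq⟩ := hI.2 i j hi hj hnegM hadjM
      exact hkeepC ⟨hnegM, q, hq, hnq⟩


theorem bApply_unchanged (r c : Nat) (M : List (List Int)) (hS : Shape r c M)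
    (hu : bUnchanged M (bStep M r c) r c = true) : bApply M (bStep M r c) c = M := by
  apply mat_ext
  · rw [bApply_length]
  · intro i
    rw [bApply_row_length M r c hS i]
  · intro i j
    rw [get2_bApplyStep M r c hS i j]
    by_cases hij : i < r ∧ j < c
    · rw [if_pos hij]
      exact (bNewVal_eq_iff M r c i j).mpr (bUnchanged_iff M r c |>.mp hu i j hij.1 hij.2)
    · rw [if_neg hij]

theorem loops_eq (r c : Nat) : ∀ (fuel : Nat) (M : List (List Int)) (Q : List (Nat × Nat))
    (passes : Int), negCount M < fuel → Shape r c M → BfsInv r c M Q →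
    aLoop fuel Q M passes = bLoop fuel r c M passes := by
  intro fuel
  induction fuel with
  | zero =>
    intro M Q passes hn hS hI
    omega
  | succ fuel ih =>
    intro M Q passes hn hS hI
    obtain ⟨hmeq, hempty, hS', hI'⟩ := step_main r c M Q hS hI
    simp only [aLoop, bLoop]
    by_cases he : (processQueue Q M).1 = []
    · rw [if_neg (not_not_intro he), if_pos (hempty.mp he), hmeq,
        bApply_unchanged r c M hS (hempty.mp he)]
    · rw [if_pos he, if_neg (fun hu => he (hempty.mpr hu)), ← hmeq]
      have hlt := negCount_processQueue_lt Q M he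
      exact ih (processQueue Q M).2 (processQueue Q M).1 (passes + 1) (by omega) hS' hI'

-- the `len(queue) == r * c` shortcut: a full queue means every in-range cell is positive
theorem sum_le_const (c : Nat) : ∀ (l : List Nat), (∀ x ∈ l, x ≤ c) → l.sum ≤ l.length * c := by
  intro l
  induction l with
  | nil => simp
  | cons a t ih =>
    intro h
    have h0 := h a (by simp)
    have := ih (fun x hx => h x (List.mem_cons_of_mem a hx))
    simp only [List.sum_cons, List.length_cons]
    have : t.sum ≤ t.length * c := this
    calc a + t.sum ≤ c + t.length * c := by omega
    _ = (t.length + 1) * c := by ring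

theorem sum_forcing (c : Nat) : ∀ (l : List Nat), (∀ x ∈ l, x ≤ c) →
    l.sum = l.length * c → ∀ x ∈ l, x = c := by
  intro l
  induction l with
  | nil => simp
  | cons a t ih =>
    intro h heq x hx
    have h0 := h a (by simp)
    have ht : t.sum ≤ t.length * c := sum_le_const c t (fun y hy => h y (List.mem_cons_of_mem a hy))
    simp only [List.sum_cons, List.length_cons] at heq
    have ha : a = c := by
      by_contra hne
      have : a < c := by omega
      have : a + t.sum < (t.length + 1) * c := by
        have : (t.length + 1) * c = t.length * c + c := by ring
        omega
      omega
    rcases List.mem_cons.mp hx with rfl | hx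
    · exact ha
    · apply ih (fun y hy => h y (List.mem_cons_of_mem a hy)) _ x hx
      have : (t.length + 1) * c = t.length * c + c := by ring
      omega

theorem initQueue_mem (M : List (List Int)) (r c : Nat) (p : Nat × Nat) :
    p ∈ initQueue M r c ↔ p.1 < r ∧ p.2 < c ∧ 0 < get2 M p.1 p.2 := by
  simp only [initQueue, List.mem_flatMap, List.mem_map, List.mem_filter, List.mem_range,
    decide_eq_true_eq]
  constructor
  · rintro ⟨row, hrow, col, ⟨hcol, hposv⟩, rfl⟩
    exact ⟨hrow, hcol, hposv⟩
  · rintro ⟨h1, h2, h3⟩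
    exact ⟨p.1, h1, p.2, ⟨h2, h3⟩, rfl⟩

theorem filter_full {α : Type} (p : α → Bool) : ∀ (l : List α),
    (l.filter p).length = l.length → ∀ x ∈ l, p x = true := by
  intro l
  induction l with
  | nil => simp
  | cons a t ih =>
    intro h x hx
    by_cases hp : p a = true
    · simp only [List.filter_cons, hp, if_true, List.length_cons] at h
      rcases List.mem_cons.mp hx with rfl | hx
      · exact hp
      · exact ih (by omega) x hx
    · exfalso
      simp only [List.filter_cons, hp] at h
      have := List.length_filter_le p t
      simp at h
      omega

theorem initQueue_full (M : List (List Int)) (r c : Nat)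
    (h : (initQueue M r c).length = r * c) :
    ∀ i j : Nat, i < r → j < c → 0 < get2 M i j := by
  have hlen : (initQueue M r c).length =
      ((List.range r).map (fun row =>
        ((List.range c).filter (fun col => decide (0 < get2 M row col))).length)).sum := by
    simp [initQueue, List.length_flatMap]
  rw [hlen] at h
  have hbound : ∀ x ∈ (List.range r).map (fun row =>
      ((List.range c).filter (fun col => decide (0 < get2 M row col))).length), x ≤ c := by
    intro x hx
    obtain ⟨row, _, rfl⟩ := List.mem_map.mp hx
    calc ((List.range c).filter _).length ≤ (List.range c).length := List.length_filter_le _ _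
    _ = c := List.length_range
  have hforce := sum_forcing c _ hbound (by
    rw [h]
    simp [List.length_map, List.length_range])
  intro i j hi hj
  have hfi : ((List.range c).filter (fun col => decide (0 < get2 M i col))).length = c :=
    hforce _ (List.mem_map.mpr ⟨i, List.mem_range.mpr hi, rfl⟩)
  have := filter_full _ (List.range c) (by rw [hfi, List.length_range]) j (List.mem_range.mpr hj)
  simpa using this

theorem bUnchanged_of_pos (M : List (List Int)) (r c : Nat)
    (hpos : ∀ i j : Nat, i < r → j < c → 0 < get2 M i j) :
    bUnchanged M (bStep M r c) r c = true := by
  rw [bUnchanged_iff]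
  intro i j hi hj hcon
  have := hpos i j hi hj
  omega

theorem bLoop_pos (fuel r c : Nat) (M : List (List Int)) (passes : Int)
    (hpos : ∀ i j : Nat, i < r → j < c → 0 < get2 M i j) :
    bLoop (fuel + 1) r c M passes = (passes, M) := by
  simp only [bLoop]
  rw [if_pos (bUnchanged_of_pos M r c hpos)]

theorem hasNeg_false_of_pos (M : List (List Int)) (r c : Nat)
    (hpos : ∀ i j : Nat, i < r → j < c → 0 < get2 M i j) :
    hasNeg M r c = false := by
  simp only [hasNeg, List.any_eq_false, List.mem_range]
  intro i hi hcon
  rw [List.any_eq_true] at hcon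
  obtain ⟨j, hj, hneg⟩ := hcon
  rw [List.mem_range] at hj
  rw [decide_eq_true_eq] at hneg
  have := hpos i j hi hj
  omega

-- ===== VERDICT (by name: the statement is the Claim_ definition above) =====
theorem minimumPassesOfMatrix_spec : Claim_equal_minimumPassesOfMatrix := by
  intro matrix hdom hpre
  unfold Spec_minimumPassesOfMatrix
  obtain ⟨hne, hrows⟩ := hpre
  simp only [minimumPassesOfMatrix, minimumPassesOfMatrix_alt]
  have hS : Shape matrix.length (matrix.getD 0 []).length matrix := ⟨rfl, rfl, hrows⟩
  by_cases hfull : (initQueue matrix matrix.length (matrix.getD 0 []).length).length =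
      matrix.length * (matrix.getD 0 []).length
  · rw [if_pos hfull]
    have hpos := initQueue_full matrix _ _ hfull
    rw [bLoop_pos _ _ _ matrix 0 hpos, hasNeg_false_of_pos matrix _ _ hpos]
    simp
  · rw [if_neg hfull]
    have hI : BfsInv matrix.length (matrix.getD 0 []).length matrix
        (initQueue matrix matrix.length (matrix.getD 0 []).length) := by
      constructor
      · exact fun q hq => (initQueue_mem matrix _ _ q).mp hq
      · intro i j hi hj hneg hadj
        obtain ⟨n, hn1, hn2, hn3, hnb⟩ := adjPos_elim matrix _ _ i j hi hj hadj
        exact ⟨n, (initQueue_mem matrix _ _ n).mpr ⟨hn1, hn2, hn3⟩, hnb⟩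
    rw [loops_eq _ _ (negCount matrix + 1) matrix _ 0 (by omega) hS hI]
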